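-- pv_equiv track=rewrite | github.com/fwwieffering/advent-of-code-2020 | advent/exercises/ten.py | get_joltage_diffs
-- ===== SOURCE A (Python) =====
-- from typing import List, Tuple
--
-- def get_joltage_diffs(jolts: List[int]) -> Tuple[List[int], List[int]]:
--     final_jolts = []
--     diffs = []
--     sorted_jolts = sorted(jolts)
--     # wall joltage is 0
--     final_jolts.append(0)
--
--     for idx, j in enumerate(sorted_jolts):
--         prev_jolt = final_jolts[-1]
--         diff = j - prev_jolt
--
--         if diff <= 3:
--             diffs.append(diff)
--             final_jolts.append(j)
--
--     # laptop joltage is 3 + final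
--     final_jolts.append(final_jolts[-1] + 3)
--     diffs.append(3)
--     return final_jolts, diffs
-- ===== SOURCE B (Python) =====
-- from typing import List, Tuple
--
-- def get_joltage_diffs(jolts: List[int]) -> Tuple[List[int], List[int]]:
--     # gap-cut algorithm: compute all adjacent gaps of the wall-padded sorted list;
--     # since rejection is monotone, everything from the first gap > 3 on is
--     # unreachable, so just cut there and slice.
--     full = [0] + sorted(jolts)
--     gaps = [b - a for a, b in zip(full, full[1:])]
--     k = next((i for i, g in enumerate(gaps) if g > 3), len(gaps))
--     final_jolts = full[:k + 1] + [full[k] + 3]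
--     diffs = gaps[:k] + [3]
--     return final_jolts, diffs
-- ===== Notes on version B (the rewrite author's own statement) =====
-- stated objective: alternative
-- what changed: B drops A's greedy accept-fold (which maintains the last accepted adapter and two parallel lists) for a gap-cut algorithm: it computes all adjacent gaps of the wall-padded sorted list, finds the first gap exceeding 3 (rejection is monotone on a sorted list, so everything after it is unreachable), and obtains both outputs by slicing at that cut.
import Mathlib
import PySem

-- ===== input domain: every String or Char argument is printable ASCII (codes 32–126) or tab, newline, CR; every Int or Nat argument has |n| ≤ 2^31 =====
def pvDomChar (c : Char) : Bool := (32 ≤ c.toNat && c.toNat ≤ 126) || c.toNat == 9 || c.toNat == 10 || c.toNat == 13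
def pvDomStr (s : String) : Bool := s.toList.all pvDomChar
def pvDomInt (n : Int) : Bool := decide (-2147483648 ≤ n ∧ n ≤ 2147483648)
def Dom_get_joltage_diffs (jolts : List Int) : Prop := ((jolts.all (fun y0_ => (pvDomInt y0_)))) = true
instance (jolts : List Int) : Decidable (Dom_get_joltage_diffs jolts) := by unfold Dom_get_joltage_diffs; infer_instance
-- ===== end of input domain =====

-- B replaces A's greedy accept-fold with a gap-cut algorithm: all adjacent gaps of the padded
-- sorted list are computed, the list is cut at the first gap > 3 (rejection is monotone on a
-- sorted list), and both outputs are slices (alternative decomposition, same cost).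

-- ===== PORT A =====
def get_joltage_diffs (jolts : List Int) : List Int × List Int :=
  let sorted_jolts := (PySem.List.sorted jolts (fun x => x))
  let st := sorted_jolts.foldl (fun (st : List Int × List Int) j =>
      let prev_jolt := (PySem.List.pyGet? st.1 (-1)).getD 0  -- final_jolts[-1]; list is never empty, default never used
      let diff := j - prev_jolt
      if diff ≤ 3 then (st.1 ++ [j], st.2 ++ [diff]) else st)
    ([0], [])
  (st.1 ++ [(PySem.List.pyGet? st.1 (-1)).getD 0 + 3], st.2 ++ [3])

-- ===== PORT B =====
-- next((i for i, g in enumerate(gaps) if g > 3), len(gaps)): first index with gap > 3, else length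
def pvFirstBig : List Int → Nat
  | [] => 0
  | g :: t => if g > 3 then 0 else 1 + pvFirstBig t

def get_joltage_diffs_alt (jolts : List Int) : List Int × List Int :=
  let full := 0 :: PySem.List.sorted jolts (fun x => x)          -- [0] + sorted(jolts)
  let gaps := (full.zip (PySem.List.slice full (some 1) none)).map (fun p => p.2 - p.1)
  let k := pvFirstBig gaps
  let final_jolts := full.take (k + 1) ++ [(PySem.List.pyGet? full (k : Int)).getD 0 + 3]
      -- full[:k+1] and full[k]; k+1 ≥ 0 so the slice is take, and k < len(full) always
  (final_jolts, gaps.take k ++ [3])                              -- gaps[:k]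

-- ===== PRECONDITION & SPEC =====
def Spec_get_joltage_diffs (jolts : List Int) (out : List Int × List Int) : Prop := out = get_joltage_diffs_alt jolts
instance (jolts : List Int) (out : List Int × List Int) : Decidable (Spec_get_joltage_diffs jolts out) := by unfold Spec_get_joltage_diffs; infer_instance

-- ===== CLAIM =====
def Claim_equal_get_joltage_diffs : Prop := ∀ (jolts : List Int), Dom_get_joltage_diffs jolts → Spec_get_joltage_diffs jolts (get_joltage_diffs jolts)

-- ===== LEMMAS AND PROOFS =====

-- number of adapters A accepts from a sorted remainder, given the last accepted value
def pvAccepted (prev : Int) : List Int → Nat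
  | [] => 0
  | x :: t => if x - prev > 3 then 0 else 1 + pvAccepted x t

-- gaps of prev :: s
def pvGaps (prev : Int) : List Int → List Int
  | [] => []
  | x :: t => (x - prev) :: pvGaps x t

-- A's fold leaves the state untouched when every remaining adapter is out of reach
theorem pvFold_rejected (l : List Int) (fj d : List Int) (p : Int)
    (hlast : (PySem.List.pyGet? fj (-1)).getD 0 = p)
    (hall : ∀ j ∈ l, ¬ (j - p ≤ 3)) :
    (l.foldl (fun (st : List Int × List Int) j =>
      let prev_jolt := (PySem.List.pyGet? st.1 (-1)).getD 0
      let diff := j - prev_jolt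
      if diff ≤ 3 then (st.1 ++ [j], st.2 ++ [diff]) else st) (fj, d)) = (fj, d) := by
  induction l with
  | nil => rfl
  | cons x t ih =>
    simp only [List.foldl_cons, hlast]
    rw [if_neg (hall x (by simp))]
    exact ih (fun j hj => hall j (by simp [hj]))

-- main invariant: on a sorted remainder, A's fold appends exactly the usable prefix and its gaps
theorem pvFold_inv (l : List Int) (fj d : List Int) (p : Int)
    (hs : l.Pairwise (· ≤ ·))
    (hlast : (PySem.List.pyGet? fj (-1)).getD 0 = p) :
    (l.foldl (fun (st : List Int × List Int) j =>
      let prev_jolt := (PySem.List.pyGet? st.1 (-1)).getD 0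
      let diff := j - prev_jolt
      if diff ≤ 3 then (st.1 ++ [j], st.2 ++ [diff]) else st) (fj, d)) =
    (fj ++ l.take (pvAccepted p l), d ++ pvGaps p (l.take (pvAccepted p l))) := by
  induction l generalizing fj d p with
  | nil => simp [pvGaps]
  | cons x t ih =>
    rcases List.pairwise_cons.mp hs with ⟨hxle, ht⟩
    by_cases hc : x - p ≤ 3
    · simp only [List.foldl_cons, hlast]
      rw [if_pos hc]
      rw [ih (fj ++ [x]) (d ++ [x - p]) x ht (by simp [PySem.List.pyGet?_neg_one])]
      have hk : pvAccepted p (x :: t) = 1 + pvAccepted x t := by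
        simp [pvAccepted, not_lt.mpr hc]
      simp [hk, Nat.add_comm 1, List.take_succ_cons, pvGaps]
    · have hk : pvAccepted p (x :: t) = 0 := by
        simp [pvAccepted, show 3 < x - p by omega]
      rw [hk]
      simp only [List.take_zero, List.append_nil, pvGaps]
      exact pvFold_rejected (x :: t) fj d p hlast (by
        intro j hj
        rcases List.mem_cons.mp hj with h | h
        · omega
        · have := hxle j h; omega)

-- B's zip comprehension computes pvGaps
theorem pvZip_eq_gaps (p : Int) (l : List Int) :
    ((p :: l).zip l).map (fun q : Int × Int => q.2 - q.1) = pvGaps p l := by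
  induction l generalizing p with
  | nil => simp [pvGaps]
  | cons x t ih => simp [pvGaps, ih]

-- the cut index of the gap list is A's accepted count
theorem pvFirstBig_gaps (p : Int) (l : List Int) :
    pvFirstBig (pvGaps p l) = pvAccepted p l := by
  induction l generalizing p with
  | nil => simp [pvGaps, pvFirstBig, pvAccepted]
  | cons x t ih => simp only [pvGaps, pvFirstBig, pvAccepted, ih]

-- slicing the gap list at the cut = gaps of the sliced list
theorem pvGaps_take (p : Int) (l : List Int) :
    (pvGaps p l).take (pvAccepted p l) = pvGaps p (l.take (pvAccepted p l)) := by
  induction l generalizing p with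
  | nil => simp [pvGaps]
  | cons x t ih =>
    by_cases hc : x - p > 3
    · simp [pvGaps, pvAccepted, hc]
    · simp [pvGaps, pvAccepted, hc, Nat.add_comm 1, ih]

theorem pvAccepted_le (p : Int) (l : List Int) : pvAccepted p l ≤ l.length := by
  induction l generalizing p with
  | nil => simp [pvAccepted]
  | cons x t ih =>
    by_cases hc : x - p > 3
    · simp [pvAccepted, hc]
    · have := ih x
      simp [pvAccepted, hc]
      omega

-- full[k] is the last element of full[:k+1]
theorem pvGet_eq_last_take (x : Int) (l : List Int) (k : Nat) (hk : k ≤ l.length) :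
    ((x :: l).getD k 0) = (((x :: l).take (k + 1)).getLast?).getD 0 := by
  induction l generalizing x k with
  | nil =>
    have : k = 0 := by simpa using hk
    subst this
    simp
  | cons y t ih =>
    cases k with
    | zero => simp
    | succ m =>
      have := ih y m (by simpa using hk)
      simpa [List.getD] using this

-- ===== VERDICT =====
theorem get_joltage_diffs_spec : Claim_equal_get_joltage_diffs := by
  intro jolts _
  unfold Spec_get_joltage_diffs
  simp only [get_joltage_diffs, get_joltage_diffs_alt]
  have hs := PySem.List.sorted_pairwise jolts (fun x => x)
  set s := PySem.List.sorted jolts (fun x => x) with hsdef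
  rw [pvFold_inv s [0] [] 0 (by simpa using hs) (by simp [PySem.List.pyGet?, PySem.List.pyIdx?])]
  simp only [PySem.List.slice_from_one, List.tail_cons]
  rw [show ((0 :: s).zip s).map (fun q : Int × Int => q.2 - q.1) = pvGaps 0 s from pvZip_eq_gaps 0 s]
  rw [pvFirstBig_gaps 0 s, pvGaps_take 0 s]
  have hk := pvAccepted_le 0 s
  set k := pvAccepted 0 s with hkdef
  have h1 : (0 :: s).take (k + 1) = 0 :: s.take k := by simp [List.take_succ_cons]
  have hlt : k < (0 :: s).length := by simp; omega
  have h2 : (PySem.List.pyGet? ([0] ++ s.take k) (-1)).getD 0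
      = (PySem.List.pyGet? (0 :: s) (k : Int)).getD 0 := by
    rw [PySem.List.pyGet?_neg_one]
    rw [PySem.List.pyGet?_eq_some_getElem (0 :: s) (i := (k : Int)) (Int.natCast_nonneg k)
        (by simpa using hk : (k : Int) < ((0 :: s).length : Int))]
    simp only [Int.toNat_natCast, Option.getD_some]
    rw [show ((0 :: s)[k]'hlt) = (0 :: s).getD k 0 by
      rw [List.getD_eq_getElem?_getD, List.getElem?_eq_getElem hlt, Option.getD_some]]
    rw [pvGet_eq_last_take 0 s k hk, h1]
    simp
  rw [h1, h2]
  simp
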